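-- pv_equiv track=rewrite | github.com/bryanseah234/telegramhunter | app/utils/helpers.py | is_valid_telegram_token
-- ===== SOURCE A (Python) =====
-- def is_valid_telegram_token(token_str: str) -> bool:
--     """
--     Strict validation to filter out Fernet strings, hashes, and junk.
--     Valid Telegram token: 123456789:AAxxxxxxxxxxxxxxxxxxxxxxxxxxxxxx
--
--     Args:
--         token_str: String to validate as Telegram bot token
--
--     Returns:
--         True if valid token format, False otherwise
--     """
--     try:
--         # Explicit Fernet rejection (starts with gAAAA)
--         if token_str.startswith("gAAAA"):
--             return False
--
--         # Must contain exactly one colon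
--         if ":" not in token_str or token_str.count(":") != 1:
--             return False
--
--         parts = token_str.split(":", 1)
--         bot_id, secret = parts
--
--         # Bot ID must be 8-10 digits, no leading zeros
--         if not bot_id.isdigit():
--             return False
--         if len(bot_id) < 8 or len(bot_id) > 10:
--             return False
--         if len(bot_id) > 1 and bot_id.startswith("0"):
--             return False
--
--         # Secret must be exactly 35 characters
--         if len(secret) != 35:
--             return False
--
--         # Secret must only contain allowed chars (base64-ish)
--         allowed = set("ABCDEFGHIJKLMNOPQRSTUVWXYZabcdefghijklmnopqrstuvwxyz0123456789_-")
--         if not all(c in allowed for c in secret):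
--             return False
--
--         # Telegram secrets ALWAYS start with "AA"
--         if not secret.startswith("AA"):
--             return False
--
--         # Suspicious: Pure hex (likely hash collision)
--         is_pure_hex = all(c in "0123456789abcdefABCDEF" for c in secret)
--         if is_pure_hex:
--             return False
--
--         return True
--     except Exception:
--         return False
-- ===== SOURCE B (Python) =====
-- _ALLOWED = "ABCDEFGHIJKLMNOPQRSTUVWXYZabcdefghijklmnopqrstuvwxyz0123456789_-"
-- _HEX = "0123456789abcdefABCDEF"
--
-- def is_valid_telegram_token(token_str: str) -> bool:
--     # One left-to-right pass with a two-phase automaton (bot-id phase, secret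
--     # phase) over constant state, instead of split + several whole-string scans.
--     in_secret = False
--     n = 0                  # characters consumed in the current phase
--     lead0 = False          # the bot id began with '0'
--     hexish = True          # the secret so far is pure hex
--     for c in token_str:
--         if not in_secret:
--             if c == ":":
--                 if n < 8 or n > 10 or lead0:
--                     return False
--                 in_secret, n = True, 0
--             elif c.isdigit():
--                 if n == 0:
--                     lead0 = c == "0"
--                 n += 1
--             else:
--                 return False
--         else:
--             if c not in _ALLOWED:
--                 return False
--             if n < 2 and c != "A":
--                 return False
--             if c not in _HEX:
--                 hexish = False
--             n += 1
--     return in_secret and n == 35 and not hexish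
-- ===== Notes on version B (the rewrite author's own statement) =====
-- stated objective: alternative
-- what changed: B replaces A's split-then-eight-guards design (split at the first colon plus several whole-string passes: colon count, allowed-set membership, prefix checks, all-hex scan) by a single left-to-right two-phase automaton that consumes one character at a time, keeping only a phase flag, a position counter, a leading-zero flag and a hex flag; A's Fernet-prefix and colon-count guards disappear because the automaton's transitions subsume them.
import Mathlib
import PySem

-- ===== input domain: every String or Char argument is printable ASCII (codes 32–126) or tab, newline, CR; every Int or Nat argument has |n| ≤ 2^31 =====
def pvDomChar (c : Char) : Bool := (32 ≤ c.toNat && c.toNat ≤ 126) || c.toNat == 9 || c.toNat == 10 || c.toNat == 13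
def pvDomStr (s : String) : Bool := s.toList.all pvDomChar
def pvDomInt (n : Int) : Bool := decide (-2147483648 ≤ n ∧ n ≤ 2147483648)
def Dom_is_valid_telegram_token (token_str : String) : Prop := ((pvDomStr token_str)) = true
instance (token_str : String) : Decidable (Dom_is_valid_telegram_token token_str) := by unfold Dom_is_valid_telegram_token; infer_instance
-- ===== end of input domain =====

-- B replaces A's split + several whole-string guard passes by a single left-to-right
-- two-phase automaton over constant state (objective: alternative, same cost).

-- ===== PORT A =====
def is_valid_telegram_token (token_str : String) : Bool :=
  let s := token_str.toList
  -- if token_str.startswith("gAAAA"): return False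
  if PySem.Chars.startswith s "gAAAA".toList then false
  -- if ":" not in token_str or token_str.count(":") != 1: return False
  else if !PySem.Chars.isIn [':'] s || !(PySem.Chars.count s [':'] == 1) then false
  else
    -- parts = token_str.split(":", 1); bot_id, secret = parts
    match PySem.Chars.splitMax? s [':'] 1 with
    | some [bot_id, secret] =>
        if !PySem.Chars.strIsdigit bot_id then false
        else if bot_id.length < 8 || bot_id.length > 10 then false
        else if decide (bot_id.length > 1) && PySem.Chars.startswith bot_id ['0'] then false
        else if !(secret.length == 35) then false
        else if !(secret.all fun c =>
            (PySem.Set.ofList "ABCDEFGHIJKLMNOPQRSTUVWXYZabcdefghijklmnopqrstuvwxyz0123456789_-".toList).contains c) then false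
        else if !PySem.Chars.startswith secret "AA".toList then false
        else if secret.all (fun c => PySem.Chars.isIn [c] "0123456789abcdefABCDEF".toList) then false
        else true
    -- unpacking into (bot_id, secret) fails -> the except branch returns False
    | _ => false

-- ===== PORT B =====
def pvAllowed : List Char := "ABCDEFGHIJKLMNOPQRSTUVWXYZabcdefghijklmnopqrstuvwxyz0123456789_-".toList
def pvHex : List Char := "0123456789abcdefABCDEF".toList

-- the automaton's loop body: state (in_secret, n, lead0, hexish), one char at a time
def pvDfa : List Char → Bool → Nat → Bool → Bool → Bool
  | [], inSecret, n, _, hexish => inSecret && n == 35 && !hexish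
  | c :: rest, false, n, lead0, hexish =>
      if c == ':' then
        if decide (n < 8) || decide (n > 10) || lead0 then false
        else pvDfa rest true 0 lead0 hexish
      else if PySem.Chars.isdigit c then
        pvDfa rest false (n + 1) (if n == 0 then c == '0' else lead0) hexish
      else false
  | c :: rest, true, n, lead0, hexish =>
      if !PySem.Chars.isIn [c] pvAllowed then false
      else if decide (n < 2) && !(c == 'A') then false
      else pvDfa rest true (n + 1) lead0
        (if !PySem.Chars.isIn [c] pvHex then false else hexish)

def is_valid_telegram_token_alt (token_str : String) : Bool :=
  pvDfa token_str.toList false 0 false true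

-- ===== PRECONDITION & SPEC =====
def Spec_is_valid_telegram_token (token_str : String) (out : Bool) : Prop := out = is_valid_telegram_token_alt token_str
instance (token_str : String) (out : Bool) : Decidable (Spec_is_valid_telegram_token token_str out) := by unfold Spec_is_valid_telegram_token; infer_instance

-- ===== CLAIM (what is proved, stated in full; the proofs are below) =====
def Claim_equal_is_valid_telegram_token : Prop := ∀ (token_str : String), Dom_is_valid_telegram_token token_str → Spec_is_valid_telegram_token token_str (is_valid_telegram_token token_str)

-- ===== LEMMAS AND PROOFS =====

theorem pv_count_go (c : Char) (l : List Char) : ∀ (f acc : Nat), l.length ≤ f →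
    PySem.Chars.count.go [c] f l acc = acc + l.count c := by
  induction l with
  | nil => intro f acc _; cases f <;> simp [PySem.Chars.count.go]
  | cons a t ih =>
      intro f acc hf
      cases f with
      | zero => simp at hf
      | succ f' =>
          have hp : [c].isPrefixOf (a :: t) = (c == a) := by simp [List.isPrefixOf]
          simp only [PySem.Chars.count.go, hp]
          by_cases hac : c = a
          · rw [if_pos (by simp [hac])]
            simp only [List.length_cons, List.length_nil, List.drop_succ_cons, List.drop_zero]
            rw [ih f' (acc+1) (by simp at hf; omega)]
            rw [List.count_cons, if_pos (by simp [hac])]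
            omega
          · rw [if_neg (by simp [hac])]
            rw [ih f' acc (by simp at hf; omega)]
            rw [List.count_cons, if_neg (by simp [Ne.symm hac]), Nat.add_zero]

theorem pv_count_singleton (c : Char) (l : List Char) :
    PySem.Chars.count l [c] = l.count c := by
  simp [PySem.Chars.count, pv_count_go c l l.length 0 le_rfl]

theorem pv_split_go (v : List Char) : ∀ (u cur : List Char) (acc : List (List Char)) (f : Nat),
    ':' ∉ u → u.length + 2 ≤ f →
    PySem.Chars.splitOnMax.go [':'] f 1 (u ++ ':' :: v) cur acc =
      acc.reverse ++ [cur.reverse ++ u, v] := by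
  intro u
  induction u with
  | nil =>
      intro cur acc f _ hf
      match f, hf with
      | (f'+1), _ =>
        have hp : [':'].isPrefixOf (':' :: v) = true := by simp [List.isPrefixOf]
        simp only [List.nil_append, PySem.Chars.splitOnMax.go, hp, if_true]
        simp only [List.length_cons, List.length_nil, List.drop_succ_cons, List.drop_zero]
        cases v with
        | nil => cases f' <;> simp [PySem.Chars.splitOnMax.go]
        | cons b w => cases f' <;> simp [PySem.Chars.splitOnMax.go]
  | cons a t ih =>
      intro cur acc f h hf
      match f, hf with
      | (f'+1), hf2 =>
        have ha : a ≠ ':' := by intro hh; exact h (by simp [hh])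
        have hp : [':'].isPrefixOf (a :: (t ++ ':' :: v)) = (':' == a) := by simp [List.isPrefixOf]
        simp only [List.cons_append, PySem.Chars.splitOnMax.go, hp]
        rw [if_neg (by omega), if_neg (by intro hh; rw [beq_iff_eq] at hh; exact ha hh.symm)]
        rw [ih (a :: cur) acc f' (fun hm => h (by simp [hm])) (by simp only [List.length_cons] at hf2 ⊢; omega)]
        simp

theorem pv_split_first (u v : List Char) (h : ':' ∉ u) :
    PySem.Chars.splitMax? (u ++ ':' :: v) [':'] 1 = some [u, v] := by
  simp only [PySem.Chars.splitMax?, PySem.Chars.splitOnMax]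
  rw [if_neg (by simp), if_neg (by omega)]
  norm_num
  rw [pv_split_go v u [] [] (u.length + (v.length + 1) + 1) h (by omega)]
  simp

theorem pv_first_colon (l : List Char) (h : ':' ∈ l) :
    ∃ u v, l = u ++ ':' :: v ∧ ':' ∉ u := by
  induction l with
  | nil => cases h
  | cons a t ih =>
      by_cases ha : a = ':'
      · exact ⟨[], t, by simp [ha], by simp⟩
      · obtain ⟨u, v, h1, h2⟩ := ih ((List.mem_cons.mp h).resolve_left (fun hh => ha hh.symm))
        exact ⟨a :: u, v, by simp [h1], by simp [Ne.symm ha, h2]⟩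

theorem pv_isIn_singleton (c : Char) (L : List Char) :
    PySem.Chars.isIn [c] L = L.contains c := by
  rw [Bool.eq_iff_iff, PySem.Chars.isIn_iff_infix, List.contains_iff_mem]
  constructor
  · intro h; exact h.subset (by simp)
  · intro h; obtain ⟨s, t, rfl⟩ := List.append_of_mem h; exact ⟨s, t, by simp⟩

theorem pv_set_contains (c : Char) (L : List Char) :
    (PySem.Set.ofList L).contains c = PySem.Chars.isIn [c] L := by
  rw [pv_isIn_singleton, Bool.eq_iff_iff, PySem.Set.contains, List.contains_iff_mem,
    List.contains_iff_mem]
  exact PySem.Set.mem_ofList L c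

-- position-indexed "first two secret chars are 'A'" condition of the automaton
def pvAAat : Nat → List Char → Bool
  | _, [] => true
  | n, c :: r => (decide (2 ≤ n) || c == 'A') && pvAAat (n + 1) r

theorem pvAAat_ge (v : List Char) : ∀ n, 2 ≤ n → pvAAat n v = true := by
  induction v with
  | nil => intro n _; rfl
  | cons c r ih =>
      intro n hn
      simp only [pvAAat, decide_eq_true hn, Bool.true_or, Bool.true_and]
      exact ih (n+1) (by omega)

theorem pv_dfa_no_colon (l : List Char) (h : ':' ∉ l) : ∀ n l0 hx,
    pvDfa l false n l0 hx = false := by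
  induction l with
  | nil => intro n l0 hx; simp [pvDfa]
  | cons c rest ih =>
      intro n l0 hx
      have hc : (c == ':') = false := by
        rw [beq_eq_false_iff_ne]; intro hh; exact h (by simp [hh])
      simp only [pvDfa, hc, Bool.false_eq_true, if_false]
      by_cases hd : PySem.Chars.isdigit c = true
      · rw [if_pos hd]; exact ih (fun hm => h (by simp [hm])) _ _ _
      · rw [if_neg hd]

theorem pv_dfa_secret (v : List Char) (l0 : Bool) : ∀ (n : Nat) (hx : Bool),
    pvDfa v true n l0 hx =
      ((v.all fun c => PySem.Chars.isIn [c] pvAllowed) && pvAAat n v &&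
        ((n + v.length : Nat) == 35) &&
        !(hx && (v.all fun c => PySem.Chars.isIn [c] pvHex))) := by
  induction v with
  | nil => intro n hx; simp [pvDfa, pvAAat]
  | cons c r ih =>
      intro n hx
      by_cases hal : PySem.Chars.isIn [c] pvAllowed = true
      · by_cases haa : (decide (n < 2) && !(c == 'A')) = true
        · have h2 : ((decide (2 ≤ n) || c == 'A')) = false := by
            simp only [Bool.and_eq_true, decide_eq_true_eq, Bool.not_eq_eq_eq_not,
              Bool.not_true] at haa
            simp [haa.2]; omega
          simp only [pvDfa, hal, Bool.not_true, Bool.false_eq_true, if_false, haa, if_true,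
            pvAAat, h2, List.all_cons]
          simp
        · have h2 : ((decide (2 ≤ n) || c == 'A')) = true := by
            simp only [Bool.and_eq_true, decide_eq_true_eq, Bool.not_eq_eq_eq_not,
              Bool.not_true, not_and] at haa
            by_cases hn : 2 ≤ n
            · simp [hn]
            · have := haa (by omega)
              simp [this]
          simp only [pvDfa, hal, Bool.not_true, Bool.false_eq_true, if_false,
            haa, if_false, pvAAat, List.all_cons, h2, Bool.true_and]
          rw [ih]
          have hlen : ((n + 1 + r.length : Nat) == 35) = ((n + (r.length + 1) : Nat) == 35) := by
            rw [Bool.eq_iff_iff]; simp; omega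
          rw [hlen]
          cases hhex : PySem.Chars.isIn [c] pvHex <;> cases hx <;>
            simp [Bool.and_comm, Bool.and_left_comm]
      · have hal' : PySem.Chars.isIn [c] pvAllowed = false := by
          cases h : PySem.Chars.isIn [c] pvAllowed
          · rfl
          · exact absurd h hal
        simp [pvDfa, hal', List.all_cons]

theorem pv_dfa_digits (v : List Char) (w : List Char) (h : ':' ∉ w) : ∀ (n : Nat) (l0 hx : Bool),
    1 ≤ n →
    pvDfa (w ++ ':' :: v) false n l0 hx =
      (if w.all PySem.Chars.isdigit then
        (if decide (n + w.length < 8) || decide (n + w.length > 10) || l0 then false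
         else pvDfa v true 0 l0 hx)
       else false) := by
  induction w with
  | nil => intro n l0 hx _; simp [pvDfa]
  | cons c w' ih =>
      intro n l0 hx hn
      have hc : (c == ':') = false := by
        rw [beq_eq_false_iff_ne]; intro hh; exact h (by simp [hh])
      have hn0 : (n == 0) = false := by simp; omega
      simp only [List.cons_append, pvDfa, hc, Bool.false_eq_true, if_false, hn0, List.all_cons]
      by_cases hd : PySem.Chars.isdigit c = true
      · rw [if_pos hd, ih (fun hm => h (by simp [hm])) (n+1) l0 hx (by omega)]
        simp only [hd, Bool.true_and, List.length_cons]
        have h1 : n + 1 + w'.length = n + (w'.length + 1) := by omega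
        rw [h1]
        rfl
      · rw [if_neg hd]
        have hd' : PySem.Chars.isdigit c = false := by
          cases hh : PySem.Chars.isdigit c
          · rfl
          · exact absurd hh hd
        simp [hd']

-- ===== VERDICT (by name: the statement is the Claim_ definition above) =====
set_option maxRecDepth 8192 in
theorem is_valid_telegram_token_spec : Claim_equal_is_valid_telegram_token := by
  intro ts _
  unfold Spec_is_valid_telegram_token
  by_cases hm : ':' ∈ ts.toList
  · obtain ⟨u, v, hl, hu⟩ := pv_first_colon ts.toList hm
    have hcount : PySem.Chars.count ts.toList [':'] = 1 + v.count ':' := by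
      rw [hl, pv_count_singleton]
      simp [List.count_append, List.count_eq_zero.mpr hu]
      omega
    have hisin : PySem.Chars.isIn [':'] ts.toList = true := by
      rw [PySem.Chars.isIn_iff_infix _ _, hl]; exact ⟨u, v, by simp⟩
    have hsplit : PySem.Chars.splitMax? ts.toList [':'] 1 = some [u, v] := by
      rw [hl]; exact pv_split_first u v hu
    rw [is_valid_telegram_token_alt, hl]
    cases u with
    | nil =>
        have hB : pvDfa ([] ++ ':' :: v) false 0 false true = false := by
          simp [pvDfa]
        rw [hB]
        simp [is_valid_telegram_token, hsplit, PySem.Chars.strIsdigit]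
    | cons a w =>
        have hna : (a == ':') = false := by
          rw [beq_eq_false_iff_ne]; intro hh; exact hu (by simp [hh])
        have hw : ':' ∉ w := fun hm => hu (by simp [hm])
        by_cases hd : PySem.Chars.isdigit a = true
        · have hstep : pvDfa ((a :: w) ++ ':' :: v) false 0 false true =
              pvDfa (w ++ ':' :: v) false 1 (a == '0') true := by
            simp [pvDfa, hna, hd]
          rw [hstep, pv_dfa_digits v w hw 1 (a == '0') true le_rfl]
          by_cases hwall : w.all PySem.Chars.isdigit = true
          · have hsd : PySem.Chars.strIsdigit (a :: w) = true := by
              simp only [PySem.Chars.strIsdigit, List.isEmpty_cons, Bool.not_false,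
                List.all_cons, hd, Bool.true_and, hwall]
            have hag : ('g' == a) = false := by
              rw [beq_eq_false_iff_ne]
              intro hh; rw [← hh] at hd; exact absurd hd (by decide)
            have hga : PySem.Chars.startswith ts.toList "gAAAA".toList = false := by
              rw [hl]
              simp [PySem.Chars.startswith, List.isPrefixOf, beq_eq_false_iff_ne.mp hag]
            by_cases hcv : ':' ∈ v
            · have hc1 : (PySem.Chars.count ts.toList [':'] == 1) = false := by
                rw [hcount]
                have := List.count_pos_iff.mpr hcv
                simp; omega
              have hvall : (v.all fun c => PySem.Chars.isIn [c] pvAllowed) = false := by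
                rw [List.all_eq_false]
                exact ⟨':', hcv, by decide⟩
              rw [pv_dfa_secret, hvall]
              simp [is_valid_telegram_token, hc1, hwall]
            · have hc1 : (PySem.Chars.count ts.toList [':'] == 1) = true := by
                rw [hcount, List.count_eq_zero.mpr hcv]
                rfl
              rw [pv_dfa_secret]
              simp only [is_valid_telegram_token, hga, hisin, hc1, hsplit, hsd,
                Bool.not_true, Bool.not_false, Bool.false_eq_true, if_false,
                Bool.false_or, Bool.or_false, Bool.true_and, List.length_cons]
              have e8 : decide (1 + w.length < 8) = decide (w.length + 1 < 8) := by
                rw [Nat.add_comm]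
              have e10 : decide (1 + w.length > 10) = decide (w.length + 1 > 10) := by
                rw [Nat.add_comm]
              rw [e8, e10]
              by_cases h8 : w.length + 1 < 8
              · simp [h8]
              · rw [decide_eq_false h8]
                by_cases h10 : w.length + 1 > 10
                · simp [h10]
                · rw [decide_eq_false h10]
                  simp only [Bool.false_or, decide_eq_true (show w.length + 1 > 1 by omega),
                    Bool.true_and]
                  have hsw0 : PySem.Chars.startswith (a :: w) ['0'] = (a == '0') := by
                    simp only [PySem.Chars.startswith, List.isPrefixOf, Bool.and_true]
                    exact BEq.comm
                  rw [hsw0]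
                  by_cases h35 : v.length = 35
                  · match v, h35 with
                    | b1 :: b2 :: v', h35 =>
                      have hAA : pvAAat 0 (b1 :: b2 :: v') = ((b1 == 'A') && (b2 == 'A')) := by
                        simp [pvAAat, pvAAat_ge v' 2 le_rfl]
                      have hsAA : PySem.Chars.startswith (b1 :: b2 :: v') "AA".toList =
                          ((b1 == 'A') && (b2 == 'A')) := by
                        simp only [show ("AA".toList) = ['A','A'] from rfl,
                          PySem.Chars.startswith, List.isPrefixOf, Bool.and_true,
                          show ('A' == b1) = (b1 == 'A') from BEq.comm,
                          show ('A' == b2) = (b2 == 'A') from BEq.comm]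
                      have hALw : ((b1 :: b2 :: v').all fun c =>
                            (PySem.Set.ofList "ABCDEFGHIJKLMNOPQRSTUVWXYZabcdefghijklmnopqrstuvwxyz0123456789_-".toList).contains c)
                          = ((b1 :: b2 :: v').all fun c => PySem.Chars.isIn [c] pvAllowed) := by
                        simp only [pv_set_contains, pvAllowed]
                      have h35' : (((b1 :: b2 :: v').length : Nat) == 35) = true := by
                        simp [h35]
                      have hL : ((0 + (b1 :: b2 :: v').length : Nat) == 35) = true := by
                        simp [h35]
                      rw [hAA, hsAA, hL, hALw, hwall]
                      simp only [decide_eq_false h8, decide_eq_false h10, Bool.or_self,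
                        Bool.false_eq_true, if_false, eq_self_iff_true, if_true, Bool.false_or,
                        decide_eq_true (show w.length + 1 > 1 by omega), Bool.true_and, h35',
                        Bool.not_true, Bool.and_true, pvHex]
                      generalize (a == '0') = z
                      generalize ((b1 :: b2 :: v').all fun c => PySem.Chars.isIn [c] pvAllowed) = AL
                      generalize ((b1 == 'A') && (b2 == 'A')) = AA
                      generalize ((b1 :: b2 :: v').all fun c =>
                        PySem.Chars.isIn [c] "0123456789abcdefABCDEF".toList) = HX
                      cases z <;> cases AL <;> cases AA <;> cases HX <;> simp [h8, h10] <;> omega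
                  · have hL : ((0 + v.length : Nat) == 35) = false := by simp [h35]
                    have hL2 : ((v.length : Nat) == 35) = false := by simp [h35]
                    rw [hL, hL2, hwall]
                    simp
          · have hsd : PySem.Chars.strIsdigit (a :: w) = false := by
              simp only [PySem.Chars.strIsdigit, List.isEmpty_cons, Bool.not_false,
                List.all_cons, hd, Bool.true_and, Bool.true_and]
              cases hx : w.all PySem.Chars.isdigit
              · rfl
              · exact absurd hx hwall
            have hwall' : w.all PySem.Chars.isdigit = false := by
              cases hx : w.all PySem.Chars.isdigit
              · rfl
              · exact absurd hx hwall
            rw [hwall']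
            simp [is_valid_telegram_token, hsplit, hsd]
        · have hd' : PySem.Chars.isdigit a = false := by
            cases hx : PySem.Chars.isdigit a
            · rfl
            · exact absurd hx hd
          have hB : pvDfa ((a :: w) ++ ':' :: v) false 0 false true = false := by
            simp [pvDfa, hna, hd']
          rw [hB]
          have hsd : PySem.Chars.strIsdigit (a :: w) = false := by
            simp [PySem.Chars.strIsdigit, hd']
          simp [is_valid_telegram_token, hsplit, hsd]
  · have hnotinf : ¬ ([':'] <:+: ts.toList) := by
      rintro ⟨s1, t1, hst⟩
      exact hm (by rw [← hst]; simp)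
    have hA : PySem.Chars.isIn [':'] ts.toList = false := (PySem.Chars.isIn_eq_false_iff _ _).mpr hnotinf
    rw [is_valid_telegram_token_alt, pv_dfa_no_colon ts.toList hm]
    simp [is_valid_telegram_token, hA]
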